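-- pv_equiv track=rewrite | github.com/Nizomiddin-web/kinobot | utils/__init__.py | detect_category_from_genres
-- ===== SOURCE A (Python) =====
-- from typing import Optional, Tuple, List, Dict
--
-- def detect_category_from_genres(genres: List[str]) -> str:
--     """Detect category from genres"""
--     genres_lower = [g.lower() for g in genres]
--
--     if 'anime' in genres_lower or 'yapon' in genres_lower:
--         return "Anime"
--     elif 'animation' in genres_lower or 'animatsiya' in genres_lower or 'multfilm' in genres_lower:
--         return "Multfilm"
--     elif 'serial' in genres_lower:
--         return "Serial"
--
--     return "Kino"
-- ===== SOURCE B (Python) =====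
-- def _classify(genre):
--     """Rank a single genre: (priority, label); lower priority wins."""
--     g = genre.lower()
--     if g in ("anime", "yapon"):
--         return (0, "Anime")
--     if g in ("animation", "animatsiya", "multfilm"):
--         return (1, "Multfilm")
--     if g == "serial":
--         return (2, "Serial")
--     return (3, "Kino")
--
-- def detect_category_from_genres(genres):
--     """Detect category from genres"""
--     best = (3, "Kino")
--     for g in genres:
--         cand = _classify(g)
--         if cand[0] < best[0]:
--             best = cand
--     return best[1]
-- ===== Notes on version B (the rewrite author's own statement) =====
-- stated objective: alternative
-- what changed: Instead of A's per-rule membership tests over the whole lowered list, B classifies each genre independently into a (priority, label) pair and keeps the running minimum-priority pair in a single pass, returning its label.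
import Mathlib
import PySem

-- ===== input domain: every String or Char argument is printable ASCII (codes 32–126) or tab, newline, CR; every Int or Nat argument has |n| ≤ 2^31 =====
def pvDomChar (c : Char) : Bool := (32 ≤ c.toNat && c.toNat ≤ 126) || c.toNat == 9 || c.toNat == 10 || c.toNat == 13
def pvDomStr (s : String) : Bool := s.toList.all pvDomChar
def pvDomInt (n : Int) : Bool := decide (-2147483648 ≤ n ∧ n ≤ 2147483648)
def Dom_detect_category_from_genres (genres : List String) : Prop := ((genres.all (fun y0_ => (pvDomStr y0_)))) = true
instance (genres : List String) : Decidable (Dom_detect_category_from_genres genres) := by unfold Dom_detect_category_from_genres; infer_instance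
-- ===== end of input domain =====

-- B replaces A's per-rule membership chain over the lowered list with per-genre (priority, label) classification and a single-pass running minimum; same return value.

-- ===== PORT A =====
def detect_category_from_genres (genres : List String) : String :=
  let genres_lower := genres.map PySem.Str.lower
  if genres_lower.contains "anime" || genres_lower.contains "yapon" then "Anime"
  else if genres_lower.contains "animation" || genres_lower.contains "animatsiya" || genres_lower.contains "multfilm" then "Multfilm"
  else if genres_lower.contains "serial" then "Serial"
  else "Kino"

-- ===== PORT B =====
-- Source B's _classify: rank a single genre as a (priority, label) pair
def pvClassify (genre : String) : Int × String :=
  let g := PySem.Str.lower genre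
  if g = "anime" || g = "yapon" then (0, "Anime")
  else if g = "animation" || g = "animatsiya" || g = "multfilm" then (1, "Multfilm")
  else if g = "serial" then (2, "Serial")
  else (3, "Kino")

-- Source B's loop: keep the minimum-priority pair, return its label
def detect_category_from_genres_alt (genres : List String) : String :=
  (genres.foldl (fun best g =>
      let cand := pvClassify g
      if cand.1 < best.1 then cand else best) (3, "Kino")).2

-- ===== PRECONDITION & SPEC =====
def Spec_detect_category_from_genres (genres : List String) (out : String) : Prop := out = detect_category_from_genres_alt genres
instance (genres : List String) (out : String) : Decidable (Spec_detect_category_from_genres genres out) := by unfold Spec_detect_category_from_genres; infer_instance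

-- ===== CLAIM (what is proved, stated in full; the proofs are below) =====
def Claim_equal_detect_category_from_genres : Prop := ∀ (genres : List String), Dom_detect_category_from_genres genres → Spec_detect_category_from_genres genres (detect_category_from_genres genres)

-- ===== LEMMAS AND PROOFS =====

-- the best (priority, label) pair A's if/elif chain selects for a genre list
def pvBest (genres : List String) : Int × String :=
  let L := genres.map PySem.Str.lower
  if L.contains "anime" || L.contains "yapon" then (0, "Anime")
  else if L.contains "animation" || L.contains "animatsiya" || L.contains "multfilm" then (1, "Multfilm")
  else if L.contains "serial" then (2, "Serial")
  else (3, "Kino")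

def pvStep (best : Int × String) (g : String) : Int × String :=
  if (pvClassify g).1 < best.1 then pvClassify g else best

def pvV4 : List (Int × String) := [(0, "Anime"), (1, "Multfilm"), (2, "Serial"), (3, "Kino")]

theorem classify_mem (g : String) : pvClassify g ∈ pvV4 := by
  unfold pvClassify pvV4; dsimp only; split_ifs <;> simp

theorem best_mem (genres : List String) : pvBest genres ∈ pvV4 := by
  unfold pvBest pvV4; dsimp only; split_ifs <;> simp

-- which branch of _classify fires, with the string facts that make it fire
theorem classify_spec (g : String) :
    (pvClassify g = (0, "Anime") ∧ (PySem.Str.lower g = "anime" ∨ PySem.Str.lower g = "yapon")) ∨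
    (pvClassify g = (1, "Multfilm") ∧ PySem.Str.lower g ≠ "anime" ∧ PySem.Str.lower g ≠ "yapon" ∧
      (PySem.Str.lower g = "animation" ∨ PySem.Str.lower g = "animatsiya" ∨ PySem.Str.lower g = "multfilm")) ∨
    (pvClassify g = (2, "Serial") ∧ PySem.Str.lower g ≠ "anime" ∧ PySem.Str.lower g ≠ "yapon" ∧
      PySem.Str.lower g ≠ "animation" ∧ PySem.Str.lower g ≠ "animatsiya" ∧ PySem.Str.lower g ≠ "multfilm" ∧
      PySem.Str.lower g = "serial") ∨
    (pvClassify g = (3, "Kino") ∧ PySem.Str.lower g ≠ "anime" ∧ PySem.Str.lower g ≠ "yapon" ∧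
      PySem.Str.lower g ≠ "animation" ∧ PySem.Str.lower g ≠ "animatsiya" ∧ PySem.Str.lower g ≠ "multfilm" ∧
      PySem.Str.lower g ≠ "serial") := by
  unfold pvClassify; dsimp only
  split_ifs with h1 h2 h3 <;> simp_all <;> tauto

set_option maxHeartbeats 1600000 in
theorem best_cons (g : String) (gs : List String) :
    pvBest (g :: gs) = pvStep (pvBest gs) g := by
  rcases classify_spec g with ⟨hc, hs⟩ | ⟨hc, h1, h2, hs⟩ | ⟨hc, h1, h2, h3, h4, h5, hs⟩ |
    ⟨hc, h1, h2, h3, h4, h5, h6⟩ <;>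
  unfold pvStep <;> rw [hc] <;> unfold pvBest <;> dsimp only <;>
  simp only [List.map_cons, List.contains_cons]
  · rcases hs with hs | hs <;> simp [hs] <;> split_ifs <;> simp_all <;> tauto
  · rcases hs with hs | hs | hs <;>
      simp [hs] <;> split_ifs <;> simp_all
  · simp [hs] <;>
      split_ifs <;> simp_all
  · simp [Ne.symm h1, Ne.symm h2, Ne.symm h3, Ne.symm h4, Ne.symm h5, Ne.symm h6] <;>
      split_ifs <;> simp_all

theorem fold_step (gs : List String) :
    ∀ best ∈ pvV4, gs.foldl pvStep best =
      if (pvBest gs).1 < best.1 then pvBest gs else best := by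
  induction gs with
  | nil =>
    intro best hb
    have : pvBest [] = (3, "Kino") := by unfold pvBest; simp
    rw [this]
    fin_cases hb <;> simp
  | cons g gs ih =>
    intro best hb
    have hstep : pvStep best g ∈ pvV4 := by
      unfold pvStep; split_ifs
      · exact classify_mem g
      · exact hb
    rw [List.foldl_cons, ih _ hstep, best_cons]
    have hc := classify_mem g
    have hp := best_mem gs
    unfold pvStep
    revert hc hp hb
    generalize pvClassify g = c
    generalize pvBest gs = p
    intro hc hp hb
    fin_cases hc <;> fin_cases hp <;> fin_cases hb <;> simp

theorem a_eq_best (genres : List String) :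
    detect_category_from_genres genres = (pvBest genres).2 := by
  unfold detect_category_from_genres pvBest
  dsimp only
  split_ifs <;> rfl

theorem b_eq_fold (genres : List String) :
    detect_category_from_genres_alt genres = (genres.foldl pvStep (3, "Kino")).2 := by
  unfold detect_category_from_genres_alt pvStep
  rfl

-- ===== VERDICT (by name: the statement is the Claim_ definition above) =====
theorem detect_category_from_genres_spec : Claim_equal_detect_category_from_genres := by
  intro genres _
  unfold Spec_detect_category_from_genres
  rw [a_eq_best, b_eq_fold,
    fold_step genres (3, "Kino") (by unfold pvV4; simp)]
  have hp := best_mem genres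
  revert hp
  generalize pvBest genres = p
  intro hp
  fin_cases hp <;> decide
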